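-- pv_equiv track=rewrite | github.com/Mohamad-Haydar/FYP | functions/inv_functions.py | checkTests
-- ===== SOURCE A (Python) =====
-- def checkTests(tests):
--     count = 0
--     summary = {
--         "Safety Qualification": 0,
--         "EMC": 0,
--         "Grid connection": 0,
--     }
--
--     for test in tests:
--         if len(tests[test]) > 0:
--             if "IEC 62109-1" in tests[test] and "IEC 62109-2" in tests[test]:
--                 summary["Safety Qualification"] += 1
--             if (
--                 ("IEC 61000-3-2" in tests[test] and "IEC 61000-3-3" in tests[test])
--                 or ("IEC 61000-3-4" in tests[test] and "IEC 61000-3-5" in tests[test])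
--                 or ("IEC 61000-3-12" in tests[test] and "IEC 61000-3-11" in tests[test])
--                 or "VDE-ARN 4105" in tests[test]
--             ):
--                 summary["EMC"] += 1
--             if (
--                 ("IEC 62116" in tests[test] and "IEC 61727" in tests[test])
--                 or ("VDE-ARN 4105" in tests[test])
--                 or ("G83/2" in tests[test])
--                 or ("G59/3" in tests[test])
--                 or ("EN 50438" in tests[test] and "En 50549-1" in tests[test])
--                 or ("As/NZS4777.2" in tests[test] and "AS/NZS4777.3" in tests[test])
--             ):
--                 summary["Grid connection"] += 1
--
--     return summary
-- ===== SOURCE B (Python) =====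
-- _CATEGORY_GROUPS = [
--     ("Safety Qualification", [["IEC 62109-1", "IEC 62109-2"]]),
--     ("EMC", [["IEC 61000-3-2", "IEC 61000-3-3"],
--              ["IEC 61000-3-4", "IEC 61000-3-5"],
--              ["IEC 61000-3-12", "IEC 61000-3-11"],
--              ["VDE-ARN 4105"]]),
--     ("Grid connection", [["IEC 62116", "IEC 61727"],
--                          ["VDE-ARN 4105"],
--                          ["G83/2"],
--                          ["G59/3"],
--                          ["EN 50438", "En 50549-1"],
--                          ["As/NZS4777.2", "AS/NZS4777.3"]]),
-- ]
--
--
-- def checkTests(tests):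
--     return {
--         cat: sum(
--             1
--             for test in tests
--             if any(all(req in tests[test] for req in group) for group in groups)
--         )
--         for cat, groups in _CATEGORY_GROUPS
--     }
-- ===== Notes on version B (the rewrite author's own statement) =====
-- stated objective: simpler
-- what changed: Replaces the three hard-coded if-chains mutating a summary dict with a static category->requirement-groups table and a per-category dict comprehension counting tests that satisfy any group (the redundant len>0 guard disappears).
import Mathlib
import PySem

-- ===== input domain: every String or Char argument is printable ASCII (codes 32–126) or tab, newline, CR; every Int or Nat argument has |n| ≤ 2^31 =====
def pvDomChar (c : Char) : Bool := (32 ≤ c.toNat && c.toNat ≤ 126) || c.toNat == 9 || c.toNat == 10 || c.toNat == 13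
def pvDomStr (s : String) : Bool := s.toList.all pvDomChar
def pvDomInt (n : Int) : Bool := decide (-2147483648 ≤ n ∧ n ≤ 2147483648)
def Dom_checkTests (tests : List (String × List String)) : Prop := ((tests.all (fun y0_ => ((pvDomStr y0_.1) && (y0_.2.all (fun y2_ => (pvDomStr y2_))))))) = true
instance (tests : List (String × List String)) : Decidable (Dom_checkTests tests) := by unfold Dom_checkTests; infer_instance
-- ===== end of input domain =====

-- B replaces A's hard-coded if-chains over a mutated summary dict by a static
-- category -> requirement-groups table with a per-category count (objective: simpler).

-- ===== PORT A =====
-- loop body of A: the three guarded increments of the summary dict for one test key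
def pvBodyA (d : PySem.Dict String (List String)) (summary : PySem.Dict String Int)
    (test : String) : PySem.Dict String Int :=
  if (d.getD test []).length > 0 then
    ((if (d.getD test []).contains "IEC 62109-1" && (d.getD test []).contains "IEC 62109-2" then
        summary.insert "Safety Qualification" (summary.getD "Safety Qualification" 0 + 1)
      else summary) |> fun summary =>
    (if ((d.getD test []).contains "IEC 61000-3-2" && (d.getD test []).contains "IEC 61000-3-3")
          || ((d.getD test []).contains "IEC 61000-3-4" && (d.getD test []).contains "IEC 61000-3-5")
          || ((d.getD test []).contains "IEC 61000-3-12" && (d.getD test []).contains "IEC 61000-3-11")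
          || (d.getD test []).contains "VDE-ARN 4105" then
        summary.insert "EMC" (summary.getD "EMC" 0 + 1)
      else summary)) |> fun summary =>
    (if ((d.getD test []).contains "IEC 62116" && (d.getD test []).contains "IEC 61727")
          || (d.getD test []).contains "VDE-ARN 4105"
          || (d.getD test []).contains "G83/2"
          || (d.getD test []).contains "G59/3"
          || ((d.getD test []).contains "EN 50438" && (d.getD test []).contains "En 50549-1")
          || ((d.getD test []).contains "As/NZS4777.2" && (d.getD test []).contains "AS/NZS4777.3") then
        summary.insert "Grid connection" (summary.getD "Grid connection" 0 + 1)
      else summary)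
  else summary

-- literal transliteration of A: iterate over the dict's keys, incrementing summary in place
def checkTests (tests : List (String × List String)) : List (String × Int) :=
  (((PySem.Dict.mk tests).keys.foldl (pvBodyA (PySem.Dict.mk tests))
    (PySem.Dict.ofList [("Safety Qualification", 0), ("EMC", 0), ("Grid connection", 0)]))).items

-- ===== PORT B =====
-- the static table of Source B
def pvCategoryGroups : List (String × List (List String)) :=
  [("Safety Qualification", [["IEC 62109-1", "IEC 62109-2"]]),
   ("EMC", [["IEC 61000-3-2", "IEC 61000-3-3"],
            ["IEC 61000-3-4", "IEC 61000-3-5"],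
            ["IEC 61000-3-12", "IEC 61000-3-11"],
            ["VDE-ARN 4105"]]),
   ("Grid connection", [["IEC 62116", "IEC 61727"],
                        ["VDE-ARN 4105"],
                        ["G83/2"],
                        ["G59/3"],
                        ["EN 50438", "En 50549-1"],
                        ["As/NZS4777.2", "AS/NZS4777.3"]])]

-- literal transliteration of Source B's dict comprehension with its inner sum
def checkTests_alt (tests : List (String × List String)) : List (String × Int) :=
  pvCategoryGroups.map (fun cg =>
    (cg.1, (PySem.Dict.mk tests).keys.foldl (fun acc test =>
      acc + (if cg.2.any (fun group =>
                group.all (fun req => ((PySem.Dict.mk tests).getD test []).contains req))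
             then 1 else 0)) 0))

-- ===== PRECONDITION & SPEC =====
def Spec_checkTests (tests : List (String × List String)) (out : List (String × Int)) : Prop := out = checkTests_alt tests
instance (tests : List (String × List String)) (out : List (String × Int)) : Decidable (Spec_checkTests tests out) := by unfold Spec_checkTests; infer_instance

-- ===== CLAIM (what is proved, stated in full; the proofs are below) =====
def Claim_equal_checkTests : Prop := ∀ (tests : List (String × List String)), Dom_checkTests tests → Spec_checkTests tests (checkTests tests)

-- ===== LEMMAS AND PROOFS =====

-- the three category conditions, in A's boolean shape
def pvP1 (e : List String) : Bool := e.contains "IEC 62109-1" && e.contains "IEC 62109-2"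
def pvP2 (e : List String) : Bool :=
  (e.contains "IEC 61000-3-2" && e.contains "IEC 61000-3-3")
    || (e.contains "IEC 61000-3-4" && e.contains "IEC 61000-3-5")
    || (e.contains "IEC 61000-3-12" && e.contains "IEC 61000-3-11")
    || e.contains "VDE-ARN 4105"
def pvP3 (e : List String) : Bool :=
  (e.contains "IEC 62116" && e.contains "IEC 61727")
    || e.contains "VDE-ARN 4105"
    || e.contains "G83/2"
    || e.contains "G59/3"
    || (e.contains "EN 50438" && e.contains "En 50549-1")
    || (e.contains "As/NZS4777.2" && e.contains "AS/NZS4777.3")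

theorem pvStepA (d : PySem.Dict String (List String)) (t : String) (a b c : Int) :
    pvBodyA d (PySem.Dict.mk [("Safety Qualification", a), ("EMC", b), ("Grid connection", c)]) t
    = PySem.Dict.mk [("Safety Qualification", a + (if pvP1 (d.getD t []) then 1 else 0)),
        ("EMC", b + (if pvP2 (d.getD t []) then 1 else 0)),
        ("Grid connection", c + (if pvP3 (d.getD t []) then 1 else 0))] := by
  unfold pvBodyA
  generalize d.getD t [] = e
  rcases e with _ | ⟨x, xs⟩
  · simp [pvP1, pvP2, pvP3]
  · rw [if_pos (by simp)]
    simp only [pvP1, pvP2, pvP3]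
    split_ifs <;>
      simp [PySem.Dict.insert, PySem.Dict.contains, PySem.Dict.getD, PySem.Dict.get?]

theorem pvLoopA (d : PySem.Dict String (List String)) (ks : List String) (a b c : Int) :
    ks.foldl (pvBodyA d)
      (PySem.Dict.mk [("Safety Qualification", a), ("EMC", b), ("Grid connection", c)])
    = PySem.Dict.mk [
        ("Safety Qualification",
          ks.foldl (fun acc t => acc + (if pvP1 (d.getD t []) then 1 else 0)) a),
        ("EMC", ks.foldl (fun acc t => acc + (if pvP2 (d.getD t []) then 1 else 0)) b),
        ("Grid connection", ks.foldl (fun acc t => acc + (if pvP3 (d.getD t []) then 1 else 0)) c)] := by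
  induction ks generalizing a b c with
  | nil => rfl
  | cons k ks ih =>
    rw [List.foldl_cons, pvStepA, List.foldl_cons, List.foldl_cons, List.foldl_cons]
    exact ih _ _ _

theorem pvCondS (e : List String) :
    ([["IEC 62109-1", "IEC 62109-2"]] : List (List String)).any
      (fun group => group.all (fun req => e.contains req)) = pvP1 e := by
  simp [pvP1]

theorem pvCondE (e : List String) :
    ([["IEC 61000-3-2", "IEC 61000-3-3"], ["IEC 61000-3-4", "IEC 61000-3-5"],
      ["IEC 61000-3-12", "IEC 61000-3-11"], ["VDE-ARN 4105"]] : List (List String)).any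
      (fun group => group.all (fun req => e.contains req)) = pvP2 e := by
  simp [pvP2, Bool.or_assoc]

theorem pvCondG (e : List String) :
    ([["IEC 62116", "IEC 61727"], ["VDE-ARN 4105"], ["G83/2"], ["G59/3"],
      ["EN 50438", "En 50549-1"], ["As/NZS4777.2", "AS/NZS4777.3"]] : List (List String)).any
      (fun group => group.all (fun req => e.contains req)) = pvP3 e := by
  simp [pvP3, Bool.or_assoc]

-- ===== VERDICT (by name: the statement is the Claim_ definition above) =====
theorem checkTests_spec : Claim_equal_checkTests := by
  intro tests _
  unfold Spec_checkTests checkTests checkTests_alt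
  rw [show PySem.Dict.ofList [("Safety Qualification", (0 : Int)), ("EMC", 0), ("Grid connection", 0)]
      = PySem.Dict.mk [("Safety Qualification", (0 : Int)), ("EMC", 0), ("Grid connection", 0)] from rfl]
  rw [pvLoopA]
  simp only [pvCategoryGroups, List.map_cons, List.map_nil, pvCondS, pvCondE, pvCondG]
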